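-- pv_equiv track=rewrite | github.com/maple-riemer/NSSA220-Project2 | packet_parser.py | one_packet
-- ===== SOURCE A (Python) =====
-- def one_packet(list):
-- 	packet = []
-- 	j = 0
-- 	for i in range(len(list)):
-- 		if list[i][0] == "0000" and j == 0:
-- 			packet.append(list[i])
-- 			j += 1
-- 		elif list[i][0] != "0000":
-- 			packet.append(list[i])
-- 		else:
-- 			packet.pop()
-- 			break
-- 	for i in range(1, len(packet)):
-- 		packet[i].pop()
-- 		packet[i].pop(0)
-- 	return packet
-- ===== SOURCE B (Python) =====
-- def one_packet(list):
-- 	# Find the index of the second "0000" delimiter in one counting pass,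
-- 	# then slice; trim the kept elements in place like the original.
-- 	end = len(list)
-- 	seen = 0
-- 	for i in range(len(list)):
-- 		if list[i][0] == "0000":
-- 			seen += 1
-- 			if seen == 2:
-- 				end = i - 1
-- 				break
-- 	packet = list[:end]
-- 	for elem in packet[1:]:
-- 		elem.pop()
-- 		elem.pop(0)
-- 	return packet
-- ===== Notes on version B (the rewrite author's own statement) =====
-- stated objective: simpler
-- what changed: B replaces A's append/pop-on-break packet construction with one counting scan that finds the index before the second "0000" delimiter and takes a single slice list[:end]; the in-place trim of the kept elements stays.
import Mathlib
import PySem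

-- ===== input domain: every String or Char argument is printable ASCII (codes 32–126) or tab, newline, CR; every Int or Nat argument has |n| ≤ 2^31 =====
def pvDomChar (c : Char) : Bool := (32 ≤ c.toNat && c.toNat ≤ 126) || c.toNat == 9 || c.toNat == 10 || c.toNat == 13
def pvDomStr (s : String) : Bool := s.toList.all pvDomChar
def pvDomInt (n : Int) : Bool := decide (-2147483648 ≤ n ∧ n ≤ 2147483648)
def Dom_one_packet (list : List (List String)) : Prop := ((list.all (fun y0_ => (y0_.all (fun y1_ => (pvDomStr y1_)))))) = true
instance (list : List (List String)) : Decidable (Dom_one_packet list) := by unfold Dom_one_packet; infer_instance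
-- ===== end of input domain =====

-- B builds the same packet from a single counting scan (index before the second "0000"
-- delimiter) plus one slice, instead of A's append/pop-on-break loop; the trim loop stays.
-- Both Pythons mutate the kept inner lists in place (pop()/pop(0)); the equivalence proved
-- here is about the RETURN value.

-- ===== PORT A =====
-- first loop of A: j is Python's j; returns (elements appended so far, whether `break` was hit)
def one_packet_scan (j : Nat) : List (List String) → List (List String) × Bool
  | [] => ([], false)
  | x :: t =>
    if (PySem.List.pyGet? x 0).getD "" = "0000" ∧ j = 0 then
      let r := one_packet_scan 1 t
      (x :: r.1, r.2)
    else if (PySem.List.pyGet? x 0).getD "" ≠ "0000" then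
      let r := one_packet_scan j t
      (x :: r.1, r.2)
    else ([], true)

-- packet[i].pop(); packet[i].pop(0)  (PySem.List.pop? is none exactly where Python raises;
-- Pre_ guarantees length ≥ 2, so the .getD-style fallbacks are never reached there)
def one_packet_trim (x : List String) : List String :=
  match PySem.List.pop? x (-1) with
  | none => []
  | some (_, r) =>
    match PySem.List.pop? r 0 with
    | none => []
    | some (_, r2) => r2

def one_packet (list : List (List String)) : List (List String) :=
  let s := one_packet_scan 0 list
  let packet := if s.2 then s.1.dropLast else s.1   -- packet.pop() just before `break`
  match packet with
  | [] => []
  | h :: t => h :: t.map one_packet_trim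

-- ===== PORT B =====
-- B's counting loop: absolute index i, running count seen; returns `end` (= i - 1 at the
-- second delimiter) or none when fewer than two delimiters occur
def one_packet_alt_find (i : Nat) (seen : Nat) : List (List String) → Option Nat
  | [] => none
  | x :: t =>
    if (PySem.List.pyGet? x 0).getD "" = "0000" then
      if seen + 1 = 2 then some (i - 1)
      else one_packet_alt_find (i + 1) (seen + 1) t
    else one_packet_alt_find (i + 1) seen t

def one_packet_alt (list : List (List String)) : List (List String) :=
  match List.take ((one_packet_alt_find 0 0 list).getD list.length) list with   -- list[:end]
  | [] => []
  | h :: t => h :: t.map (fun x => x.dropLast.tail)   -- elem.pop(); elem.pop(0), exact for 2 ≤ length (Pre_)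

-- ===== PRECONDITION & SPEC =====
-- Pre_ excludes exactly the inputs where Python A (and B) raise IndexError: an empty inner
-- list reached by the scan (list[i][0] with fewer than two "0000" delimiters strictly before
-- index i), or a kept-and-trimmed element (index ≥ 1, before the second delimiter) of length < 2.
def Pre_one_packet (list : List (List String)) : Prop :=
  (∀ i, i < list.length →
      (list.take i).countP (fun x => x.head? = some "0000") < 2 → list.getD i [] ≠ []) ∧
  (∀ i, 1 ≤ i → i < list.length →
      (list.take (i + 2)).countP (fun x => x.head? = some "0000") < 2 → 2 ≤ (list.getD i []).length)
instance (list : List (List String)) : Decidable (Pre_one_packet list) := by unfold Pre_one_packet; infer_instance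

def pvWitness_one_packet : List (List String) :=
  [["0000", "a", "b"], ["x", "y"], ["0000", "z"]]

def Spec_one_packet (list : List (List String)) (out : List (List String)) : Prop := out = one_packet_alt list
instance (list : List (List String)) (out : List (List String)) : Decidable (Spec_one_packet list out) := by unfold Spec_one_packet; infer_instance

-- ===== CLAIM (what is proved, stated in full; the proofs are below) =====
def Claim_equal_one_packet : Prop := ∀ (list : List (List String)), Dom_one_packet list → Pre_one_packet list → Spec_one_packet list (one_packet list)

-- ===== LEMMAS AND PROOFS =====

-- found break indices are in range and not before i
theorem one_packet_find_bounds (xs : List (List String)) :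
    ∀ i j e, (j = 1 → 1 ≤ i) → one_packet_alt_find i j xs = some e →
      i ≤ e + 1 ∧ e + 1 - i < xs.length := by
  induction xs with
  | nil => intro i j e _ h; simp [one_packet_alt_find] at h
  | cons x t ih =>
    intro i j e hj h
    simp only [one_packet_alt_find] at h
    split_ifs at h with h1 h2
    · -- second delimiter here
      have hj1 : j = 1 := by omega
      have hi : 1 ≤ i := hj hj1
      have : e = i - 1 := by exact (Option.some.inj h).symm
      subst this
      simp only [List.length_cons]
      constructor <;> omega
    · have := ih (i + 1) (j + 1) e (by omega) h
      simp only [List.length_cons] at this ⊢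
      constructor <;> omega
    · have := ih (i + 1) j e (fun hj1 => by omega) h
      simp only [List.length_cons] at this ⊢
      constructor <;> omega

-- A's first loop computes the prefix before the break, and whether it broke,
-- in terms of B's index search
theorem one_packet_scan_eq (xs : List (List String)) :
    ∀ i j, (j = 0 ∨ j = 1) → (j = 1 → 1 ≤ i) →
      one_packet_scan j xs =
        (xs.take (((one_packet_alt_find i j xs).map (fun e => e + 1 - i)).getD xs.length),
         (one_packet_alt_find i j xs).isSome) := by
  induction xs with
  | nil => intro i j _ _; simp [one_packet_scan, one_packet_alt_find]
  | cons x t ih =>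
    intro i j hj hi
    by_cases hd : (PySem.List.pyGet? x 0).getD "" = "0000"
    · rcases hj with hj0 | hj1
      · -- first delimiter: j goes to 1, seen goes to 1
        subst hj0
        simp only [one_packet_scan, one_packet_alt_find, hd, if_neg (by omega : ¬ (0 + 1 = 2))]
        rw [ih (i + 1) 1 (Or.inr rfl) (by omega)]
        cases hfind : one_packet_alt_find (i + 1) 1 t with
        | none => simp
        | some e =>
          have hb := one_packet_find_bounds t (i + 1) 1 e (fun _ => by omega) hfind
          have : e + 1 - i = (e + 1 - (i + 1)) + 1 := by omega
          simp [this]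
      · -- second delimiter: break
        subst hj1
        have h1 : 1 ≤ i := hi rfl
        have h0 : i - 1 + 1 - i = 0 := by omega
        simp [one_packet_scan, one_packet_alt_find, hd, h0]
    · -- not a delimiter: append and continue
      simp only [one_packet_scan, one_packet_alt_find,
        if_neg (by simp [hd] : ¬ ((PySem.List.pyGet? x 0).getD "" = "0000" ∧ j = 0)),
        if_pos hd, if_neg hd]
      rw [ih (i + 1) j hj (fun hj1 => by omega)]
      cases hfind : one_packet_alt_find (i + 1) j t with
      | none => simp
      | some e =>
        have hb := one_packet_find_bounds t (i + 1) j e (fun hj1 => by omega) hfind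
        have : e + 1 - i = (e + 1 - (i + 1)) + 1 := by omega
        simp [this]

-- the two trims agree on every list
theorem one_packet_trim_eq (x : List String) : one_packet_trim x = x.dropLast.tail := by
  rcases List.eq_nil_or_concat x with rfl | ⟨ys, y, rfl⟩
  · simp [one_packet_trim, PySem.List.pop?]
  · unfold one_packet_trim
    rw [List.concat_eq_append, PySem.List.pop?_last]
    cases ys with
    | nil => simp [PySem.List.pop?]
    | cons b u =>
      simp only [PySem.List.pop?_zero_cons]
      rw [List.dropLast_concat, List.tail_cons]

-- ===== VERDICT (by name: the statement is the Claim_ definition above) =====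
theorem one_packet_spec : Claim_equal_one_packet := by
  intro list _ _
  unfold Spec_one_packet one_packet one_packet_alt
  rw [one_packet_scan_eq list 0 0 (Or.inl rfl) (by omega)]
  cases hfind : one_packet_alt_find 0 0 list with
  | none => simp [List.map_congr_left (fun x _ => one_packet_trim_eq x)]
  | some e =>
    have hb := one_packet_find_bounds list 0 0 e (by omega) hfind
    have htake : (list.take (e + 1)).dropLast = list.take e := by
      rw [List.dropLast_eq_take, List.take_take]
      congr 1
      simp
      omega
    simp only [Option.map_some, Option.getD_some, Option.isSome_some, Nat.sub_zero, if_pos]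
    rw [htake]
    cases List.take e list with
    | nil => rfl
    | cons h t => simp [List.map_congr_left (fun x _ => one_packet_trim_eq x)]
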